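-- pv_equiv track=rewrite | github.com/SDET-SOLOMAN/code_wars_python | kata_6s/zero_plantiful_arr.py | zero_plentiful4
-- ===== SOURCE A (Python) =====
-- def zero_plentiful4(arr):
--     z = 0
--     total = 0
--
--     for num in arr + [None]:  # Adding a sentinel value to process the final sequence
--         if num == 0:
--             z += 1
--         else:
--             if z and z < 4:  # Invalid sequence of zeros
--                 return 0
--             if z >= 4:  # Valid sequence of zeros
--                 total += 1
--             z = 0  # Reset count for the next sequence
--
--     return total
-- ===== SOURCE B (Python) =====
-- def zero_plentiful4(arr):
--     n = len(arr)
--     starts = sum(1 for i in range(n) if arr[i] == 0 and (i == 0 or arr[i - 1] != 0))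
--     valid = sum(1 for i in range(n) if arr[i:i + 4] == [0, 0, 0, 0] and (i == 0 or arr[i - 1] != 0))
--     return valid if starts == valid else 0
-- ===== Notes on version B (the rewrite author's own statement) =====
-- stated objective: alternative
-- what changed: Replaces the stateful sentinel-terminated scan (running zero counter, early return) by two declarative index counts -- positions where a zero run starts, and positions where a run starts with a window of four zeros -- returning the second count when the two agree and 0 otherwise.
import Mathlib
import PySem

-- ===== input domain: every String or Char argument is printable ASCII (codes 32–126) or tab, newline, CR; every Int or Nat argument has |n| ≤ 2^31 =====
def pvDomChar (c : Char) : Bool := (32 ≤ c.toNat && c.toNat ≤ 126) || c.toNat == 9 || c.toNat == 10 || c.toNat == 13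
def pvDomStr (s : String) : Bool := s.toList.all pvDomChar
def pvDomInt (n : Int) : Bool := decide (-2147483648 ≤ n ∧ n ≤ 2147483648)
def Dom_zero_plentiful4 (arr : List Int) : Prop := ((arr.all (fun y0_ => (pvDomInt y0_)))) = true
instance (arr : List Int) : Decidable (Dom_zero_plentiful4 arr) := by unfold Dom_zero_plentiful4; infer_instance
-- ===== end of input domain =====

-- B replaces A's stateful sentinel-terminated scan by two declarative index counts
-- (run starts, and run starts opening a window of four zeros) compared at the end,
-- instead of a running zero counter with an early return (objective: alternative).

-- ===== PORT A =====
-- the 'for num in arr + [None]' loop: elements are Option Int, the appended sentinel is none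
def zpLoop : List (Option Int) → Int → Int → Int
  | [], _, total => total
  | num :: rest, z, total =>
    if num = some 0 then zpLoop rest (z + 1) total
    else if z ≠ 0 ∧ z < 4 then 0
    else if 4 ≤ z then zpLoop rest 0 (total + 1)
    else zpLoop rest 0 total

def zero_plentiful4 (arr : List Int) : Int :=
  zpLoop (arr.map some ++ [none]) 0 0

-- ===== PORT B =====
-- 'arr[i] == 0 and (i == 0 or arr[i-1] != 0)'; the pyGetD defaults are never used: the
-- accesses happen only with the index in range (0 ≤ i < len; and i ≥ 1 for arr[i-1],
-- which Python short-circuits past when i == 0).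
def zpStartB (arr : List Int) (i : Int) : Bool :=
  (PySem.List.pyGetD arr i 1 == 0) && ((i == 0) || !(PySem.List.pyGetD arr (i - 1) 1 == 0))

-- 'arr[i:i+4] == [0, 0, 0, 0] and (i == 0 or arr[i-1] != 0)'
def zpValidB (arr : List Int) (i : Int) : Bool :=
  (PySem.List.slice arr (some i) (some (i + 4)) == [0, 0, 0, 0]) &&
    ((i == 0) || !(PySem.List.pyGetD arr (i - 1) 1 == 0))

def zero_plentiful4_alt (arr : List Int) : Int :=
  let starts : Int :=
    (PySem.List.pyRange 0 arr.length 1).foldl (fun acc i => if zpStartB arr i then acc + 1 else acc) 0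
  let valid : Int :=
    (PySem.List.pyRange 0 arr.length 1).foldl (fun acc i => if zpValidB arr i then acc + 1 else acc) 0
  if starts = valid then valid else 0

-- ===== PRECONDITION & SPEC =====
def Spec_zero_plentiful4 (arr : List Int) (out : Int) : Prop := out = zero_plentiful4_alt arr
instance (arr : List Int) (out : Int) : Decidable (Spec_zero_plentiful4 arr out) := by unfold Spec_zero_plentiful4; infer_instance

-- ===== CLAIM (what is proved, stated in full; the proofs are below) =====
def Claim_equal_zero_plentiful4 : Prop := ∀ (arr : List Int), Dom_zero_plentiful4 arr → Spec_zero_plentiful4 arr (zero_plentiful4 arr)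

-- ===== LEMMAS AND PROOFS =====

-- scan forms of B's two counts (proof-side only); p = "previous element is zero" (false at i = 0)
def sC (p : Bool) : List Int → Nat
  | [] => 0
  | x :: xs => (if x = 0 ∧ p = false then 1 else 0) + sC (x == 0) xs

def vC (p : Bool) : List Int → Nat
  | [] => 0
  | x :: xs => (if (x :: xs).take 4 = [0, 0, 0, 0] ∧ p = false then 1 else 0) + vC (x == 0) xs

-- index count = scan count (run starts)
theorem sC_eq : ∀ (xs : List Int) (p : Bool),
    (List.range xs.length).countP
      (fun k => (xs.getD k 1 == 0) && (if k = 0 then !p else !(xs.getD (k - 1) 1 == 0)))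
    = sC p xs := by
  intro xs
  induction xs with
  | nil => intro p; simp [sC]
  | cons x ys ih =>
    intro p
    rw [List.length_cons, List.range_succ_eq_map, List.countP_cons, List.countP_map]
    have hcong : ∀ k ∈ List.range ys.length,
        ((fun k => ((x :: ys).getD k 1 == 0) && (if k = 0 then !p else !((x :: ys).getD (k - 1) 1 == 0))) ∘ Nat.succ) k
        = (fun k => (ys.getD k 1 == 0) && (if k = 0 then !(x == 0) else !(ys.getD (k - 1) 1 == 0))) k := by
      intro k _
      cases k with
      | zero => simp
      | succ j => simp
    rw [List.countP_congr (fun k hk => by rw [hcong k hk]), ih (x == 0)]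
    simp only [sC]
    rcases p with _ | _ <;> by_cases hx : x = 0 <;> simp [hx] <;> omega

-- index count = scan count (valid windows)
theorem vC_eq : ∀ (xs : List Int) (p : Bool),
    (List.range xs.length).countP
      (fun k => ((xs.drop k).take 4 == [0, 0, 0, 0]) && (if k = 0 then !p else !(xs.getD (k - 1) 1 == 0)))
    = vC p xs := by
  intro xs
  induction xs with
  | nil => intro p; simp [vC]
  | cons x ys ih =>
    intro p
    rw [List.length_cons, List.range_succ_eq_map, List.countP_cons, List.countP_map]
    have hcong : ∀ k ∈ List.range ys.length,
        ((fun k => (((x :: ys).drop k).take 4 == [0, 0, 0, 0]) && (if k = 0 then !p else !((x :: ys).getD (k - 1) 1 == 0))) ∘ Nat.succ) k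
        = (fun k => ((ys.drop k).take 4 == [0, 0, 0, 0]) && (if k = 0 then !(x == 0) else !(ys.getD (k - 1) 1 == 0))) k := by
      intro k _
      cases k with
      | zero => simp
      | succ j => simp
    rw [List.countP_congr (fun k hk => by rw [hcong k hk]), ih (x == 0)]
    simp only [vC]
    rcases p with _ | _ <;> by_cases hx : (x :: ys).take 4 = [0, 0, 0, 0] <;> simp [hx] <;> omega

-- each valid run start is a run start
theorem vC_le_sC : ∀ (xs : List Int) (p : Bool), vC p xs ≤ sC p xs := by
  intro xs
  induction xs with
  | nil => intro p; simp [vC, sC]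
  | cons x ys ih =>
    intro p
    simp only [vC, sC]
    refine Nat.add_le_add ?_ (ih (x == 0))
    split_ifs with h1 h2
    all_goals first
      | rfl
      | exact Nat.zero_le _
      | exact absurd ⟨(by have := h1.1; cases ys <;> simp_all : x = 0), h1.2⟩ h2

-- A-side loop lemmas
theorem zp_skip_nonzero (y : Int) (hy : y ≠ 0) (T : List (Option Int)) (total : Int) :
    zpLoop (some y :: T) 0 total = zpLoop T 0 total := by
  simp [zpLoop, hy]

theorem zp_zeros (zs : List Int) (hzs : ∀ a ∈ zs, a = 0) (T : List (Option Int)) (z total : Int) :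
    zpLoop (zs.map some ++ T) z total = zpLoop T (z + zs.length) total := by
  induction zs generalizing z with
  | nil => simp
  | cons a as ih =>
    have ha : a = 0 := hzs a (List.mem_cons_self ..)
    simp only [List.map_cons, List.cons_append, List.length_cons]
    rw [show zpLoop (some a :: (as.map some ++ T)) z total
          = zpLoop (as.map some ++ T) (z + 1) total by simp [zpLoop, ha],
        ih (fun b hb => hzs b (List.mem_cons_of_mem _ hb))]
    congr 1
    push_cast
    ring

-- the head of dropWhile fails the predicate
theorem dropWhile_head_false {α : Type} (p : α → Bool) (l : List α) (y : α) (ys : List α)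
    (h : l.dropWhile p = y :: ys) : p y = false := by
  induction l with
  | nil => simp at h
  | cons a as ih =>
    by_cases ha : p a
    · exact ih (by simpa [List.dropWhile_cons, ha] using h)
    · simp only [List.dropWhile_cons] at h
      rw [Bool.not_eq_true] at ha
      rw [ha] at h
      simp at h
      exact h.1 ▸ ha

-- finishing a zero run of length k ≥ 4: A's state (z = k) collapses to (z = 0, total + 1)
theorem zp_finish_valid (rest' : List Int) (hhd : ∀ y ys, rest' = y :: ys → y ≠ 0)
    (k total : Int) (hk : 4 ≤ k) :
    zpLoop (rest'.map some ++ [none]) k total = zpLoop (rest'.map some ++ [none]) 0 (total + 1) := by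
  cases rest' with
  | nil =>
    simp only [List.map_nil, List.nil_append]
    have hk0 : ¬(k ≠ 0 ∧ k < 4) := by omega
    simp [zpLoop, hk0, hk]
  | cons y ys =>
    have hy : y ≠ 0 := hhd y ys rfl
    have hk0 : ¬(k ≠ 0 ∧ k < 4) := by omega
    simp [zpLoop, hy, hk0, hk]

-- finishing an invalid zero run (1 ≤ k < 4): A returns 0
theorem zp_finish_invalid (rest' : List Int) (hhd : ∀ y ys, rest' = y :: ys → y ≠ 0)
    (k total : Int) (hk1 : 1 ≤ k) (hk4 : k < 4) :
    zpLoop (rest'.map some ++ [none]) k total = 0 := by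
  have hk0 : k ≠ 0 ∧ k < 4 := ⟨by omega, hk4⟩
  cases rest' with
  | nil => simp [zpLoop, hk0]
  | cons y ys =>
    have hy : y ≠ 0 := hhd y ys rfl
    simp [zpLoop, hy, hk0]

-- the flag is irrelevant when the list is empty or starts with a nonzero element
theorem sC_flag (rest : List Int) (hhd : ∀ y ys, rest = y :: ys → y ≠ 0) (p q : Bool) :
    sC p rest = sC q rest := by
  cases rest with
  | nil => rfl
  | cons y ys =>
    have hy : y ≠ 0 := hhd y ys rfl
    simp [sC, hy]

theorem vC_flag (rest : List Int) (hhd : ∀ y ys, rest = y :: ys → y ≠ 0) (p q : Bool) :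
    vC p rest = vC q rest := by
  cases rest with
  | nil => rfl
  | cons y ys =>
    have hy : y ≠ 0 := hhd y ys rfl
    simp [vC, hy]

-- zeros after the first zero of a run contribute nothing
theorem sC_zero_run (j : Nat) (rest : List Int) :
    sC true (List.replicate j 0 ++ rest) = sC true rest := by
  induction j with
  | zero => rfl
  | succ i ih => simpa [List.replicate_succ, sC] using ih

theorem vC_zero_run (j : Nat) (rest : List Int) :
    vC true (List.replicate j 0 ++ rest) = vC true rest := by
  induction j with
  | zero => rfl
  | succ i ih => simpa [List.replicate_succ, vC] using ih

-- the window at a maximal zero run's start is all zeros iff the run has length ≥ 4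
theorem window_iff (k : Nat) (rest : List Int) (hhd : ∀ y ys, rest = y :: ys → y ≠ 0) :
    ((List.replicate k (0 : Int) ++ rest).take 4 = [0, 0, 0, 0]) ↔ 4 ≤ k := by
  match k with
  | 0 | 1 | 2 | 3 =>
    cases rest with
    | nil => simp [List.replicate]
    | cons y ys =>
      have hy : y ≠ 0 := hhd y ys rfl
      simp [List.replicate, List.take, hy]
  | (n + 4) =>
    simp [List.replicate]

-- A's loop in terms of the two scan counts
theorem zpLoop_eq_aux : ∀ (n : Nat) (xs : List Int), xs.length ≤ n → ∀ (total : Int),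
    zpLoop (xs.map some ++ [none]) 0 total
      = if sC false xs = vC false xs then total + (vC false xs : Int) else 0 := by
  intro n
  induction n with
  | zero =>
    intro xs hxs total
    have : xs = [] := List.eq_nil_of_length_eq_zero (Nat.le_zero.mp hxs)
    subst this
    simp [zpLoop, sC, vC]
  | succ n ih =>
    intro xs hxs total
    cases xs with
    | nil => simp [zpLoop, sC, vC]
    | cons x r0 =>
      by_cases hx : x = 0
      · -- maximal zero prefix t, remainder r
        have ht : (x :: r0).takeWhile (fun y => y == 0) = x :: r0.takeWhile (fun y => y == 0) := by
          simp [hx]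
        set t := (x :: r0).takeWhile (fun y => y == 0) with htdef
        set r := (x :: r0).dropWhile (fun y => y == 0) with hrdef
        have hsplit : t ++ r = x :: r0 := List.takeWhile_append_dropWhile
        have htz : ∀ a ∈ t, a = 0 := by
          intro a ha
          simpa using List.mem_takeWhile_imp ha
        have hhd : ∀ y ys, r = y :: ys → y ≠ 0 := by
          intro y ys h
          have := dropWhile_head_false (fun y => y == 0) (x :: r0) y ys h
          simpa using this
        have hrlen : r.length ≤ n := by
          have h1 : r.length ≤ r0.length := by
            rw [hrdef, List.dropWhile_cons]
            simp only [hx, beq_self_eq_true, if_true]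
            exact List.length_dropWhile_le _ _
          simp only [List.length_cons] at hxs
          omega
        obtain ⟨m, hm⟩ : ∃ m, t.length = m + 1 :=
          ⟨(r0.takeWhile (fun y => y == 0)).length, by rw [ht]; simp⟩
        have htrep : t = List.replicate (m + 1) (0 : Int) := by
          rw [← hm]
          exact List.eq_replicate_of_mem htz
        have hxsrw : x :: r0 = List.replicate (m + 1) (0 : Int) ++ r := by
          rw [← hsplit, htrep]
        rw [hxsrw]
        -- A side: absorb the zeros, then finish the run
        rw [List.map_append, List.append_assoc,
            zp_zeros _ (by simp) _ 0 total]
        simp only [List.length_replicate, zero_add]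
        -- scan side values
        have hsC : sC false (List.replicate (m + 1) (0 : Int) ++ r) = 1 + sC false r := by
          simp only [List.replicate_succ, List.cons_append, sC, beq_self_eq_true]
          rw [sC_zero_run, sC_flag r hhd true false]
          simp
        have hvC : vC false (List.replicate (m + 1) (0 : Int) ++ r)
            = (if 4 ≤ m + 1 then 1 else 0) + vC false r := by
          conv_lhs => rw [List.replicate_succ, List.cons_append]
          simp only [vC, beq_self_eq_true]
          rw [show (0 : Int) :: (List.replicate m 0 ++ r) = List.replicate (m + 1) (0 : Int) ++ r by
                rw [List.replicate_succ, List.cons_append]]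
          rw [vC_zero_run, vC_flag r hhd true false]
          by_cases hw : 4 ≤ m + 1
          · simp [(window_iff (m + 1) r hhd).mpr hw, hw]
          · have : ¬(List.replicate (m + 1) (0 : Int) ++ r).take 4 = [0, 0, 0, 0] := by
              intro hcon
              exact hw ((window_iff (m + 1) r hhd).mp hcon)
            simp [this, hw]
        rw [hsC, hvC]
        by_cases hk : 4 ≤ m + 1
        · rw [zp_finish_valid r hhd _ total (by exact_mod_cast Nat.cast_le.mpr hk),
              ih r hrlen (total + 1)]
          simp only [hk, if_true]
          by_cases he : sC false r = vC false r
          · simp [he]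
            ring
          · simp [he]
        · rw [zp_finish_invalid r hhd _ total (by exact_mod_cast Nat.succ_le_succ (Nat.zero_le m))
                (by exact_mod_cast Nat.lt_of_not_le hk)]
          have hle := vC_le_sC r false
          rw [if_neg hk]
          have hne : ¬(1 + sC false r = 0 + vC false r) := by omega
          rw [if_neg hne]
      · -- nonzero head: skip it on both sides
        simp only [List.map_cons, List.cons_append]
        rw [zp_skip_nonzero x hx]
        have h1 : r0.length ≤ n := by
          simp only [List.length_cons] at hxs; omega
        rw [ih r0 h1 total]
        have hxb : (x == 0) = false := by simp [hx]
        simp [sC, vC, hx, hxb]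

-- B's index predicates at a natural index, in getD/drop-take form
theorem start_pred (arr : List Int) (k : Nat) :
    zpStartB arr (k : Int)
      = ((arr.getD k 1 == 0) && (if k = 0 then !false else !(arr.getD (k - 1) 1 == 0))) := by
  cases k with
  | zero => simp [zpStartB, PySem.List.pyGetD_zero, List.getD]
  | succ j =>
    unfold zpStartB
    rw [PySem.List.pyGetD_natCast,
        show ((j + 1 : Nat) : Int) - 1 = ((j : Nat) : Int) by push_cast; ring,
        PySem.List.pyGetD_natCast]
    have hz : ((j : Int) + 1 == 0) = false := by
      rw [beq_eq_false_iff_ne]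
      omega
    simp [hz]

theorem valid_pred (arr : List Int) (k : Nat) :
    zpValidB arr (k : Int)
      = (((arr.drop k).take 4 == [0, 0, 0, 0]) && (if k = 0 then !false else !(arr.getD (k - 1) 1 == 0))) := by
  cases k with
  | zero =>
    simp [zpValidB, PySem.List.slice_to]
  | succ j =>
    unfold zpValidB
    rw [show ((j + 1 : Nat) : Int) + 4 = ((j + 1 : Nat) : Int) + ((4 : Nat) : Int) by norm_num,
        PySem.List.slice_natCast_add,
        show ((j + 1 : Nat) : Int) - 1 = ((j : Nat) : Int) by push_cast; ring,
        PySem.List.pyGetD_natCast]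
    have hz : ((j : Int) + 1 == 0) = false := by
      rw [beq_eq_false_iff_ne]
      omega
    simp [hz]

-- B's program in terms of the two index counts
theorem alt_eq (arr : List Int) :
    zero_plentiful4_alt arr
      = if ((List.range arr.length).countP
              (fun k => (arr.getD k 1 == 0) && (if k = 0 then !false else !(arr.getD (k - 1) 1 == 0)))
            : Int)
          = ((List.range arr.length).countP
              (fun k => ((arr.drop k).take 4 == [0, 0, 0, 0]) && (if k = 0 then !false else !(arr.getD (k - 1) 1 == 0)))
            : Int)
        then ((List.range arr.length).countP
              (fun k => ((arr.drop k).take 4 == [0, 0, 0, 0]) && (if k = 0 then !false else !(arr.getD (k - 1) 1 == 0)))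
            : Int)
        else 0 := by
  unfold zero_plentiful4_alt
  rw [PySem.List.pyRange_zero_nat, PySem.List.foldl_if_add_one, PySem.List.foldl_if_add_one,
      List.countP_map, List.countP_map]
  simp only [zero_add]
  have hS : List.countP (zpStartB arr ∘ fun k => ((k : Nat) : Int)) (List.range arr.length)
      = List.countP
          (fun k => (arr.getD k 1 == 0) && (if k = 0 then !false else !(arr.getD (k - 1) 1 == 0)))
          (List.range arr.length) :=
    List.countP_congr (fun k _ => by simp only [Function.comp_apply]; rw [start_pred arr k])
  have hV : List.countP (zpValidB arr ∘ fun k => ((k : Nat) : Int)) (List.range arr.length)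
      = List.countP
          (fun k => ((arr.drop k).take 4 == [0, 0, 0, 0]) && (if k = 0 then !false else !(arr.getD (k - 1) 1 == 0)))
          (List.range arr.length) :=
    List.countP_congr (fun k _ => by simp only [Function.comp_apply]; rw [valid_pred arr k])
  rw [hS, hV]

-- ===== VERDICT (by name: the statement is the Claim_ definition above) =====
theorem zero_plentiful4_spec : Claim_equal_zero_plentiful4 := by
  intro arr _
  unfold Spec_zero_plentiful4 zero_plentiful4
  rw [zpLoop_eq_aux arr.length arr le_rfl 0, alt_eq arr, sC_eq arr false, vC_eq arr false]
  by_cases he : sC false arr = vC false arr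
  · simp [he]
  · have hne : ¬((sC false arr : Int) = (vC false arr : Int)) := by
      exact_mod_cast he
    simp [he, hne]
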